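-- pv_equiv track=rewrite | github.com/eliteGoblin/sky_ladder | sessions/labuladong/array/567.py | dict1_comp_dict2
-- ===== SOURCE A (Python) =====
-- def dict1_comp_dict2(dict1, dict2) -> int:
--     # 0 means euqal, -1 keys in dict2 not in dict1; 1: keys in dict2 all in dict1, but dict1 is more
--     for k, v in dict2.items():
--         if k not in dict1 or v > dict1[k]:
--             return -1
--     for k, v in dict1.items():
--         if k not in dict2 or v > dict2[k]:
--             return 1
--     return 0
-- ===== SOURCE B (Python) =====
-- def dict1_comp_dict2(dict1, dict2) -> int:
--     # One pass over the union of keys, maintaining two flags, instead of two directional scans.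
--     dict2_exceeds = False
--     dict1_exceeds = False
--     for k in set(dict1) | set(dict2):
--         v1 = dict1.get(k)
--         v2 = dict2.get(k)
--         if v2 is not None and (v1 is None or v2 > v1):
--             dict2_exceeds = True
--         if v1 is not None and (v2 is None or v1 > v2):
--             dict1_exceeds = True
--     return -1 if dict2_exceeds else (1 if dict1_exceeds else 0)
-- ===== Notes on version B (the rewrite author's own statement) =====
-- stated objective: alternative
-- what changed: Replaces A's two directional early-return scans (dict2-over-dict1 first, then dict1-over-dict2) by a single pass over the union of the key sets that maintains two boolean flags and decides -1/1/0 once at the end.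
import Mathlib
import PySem

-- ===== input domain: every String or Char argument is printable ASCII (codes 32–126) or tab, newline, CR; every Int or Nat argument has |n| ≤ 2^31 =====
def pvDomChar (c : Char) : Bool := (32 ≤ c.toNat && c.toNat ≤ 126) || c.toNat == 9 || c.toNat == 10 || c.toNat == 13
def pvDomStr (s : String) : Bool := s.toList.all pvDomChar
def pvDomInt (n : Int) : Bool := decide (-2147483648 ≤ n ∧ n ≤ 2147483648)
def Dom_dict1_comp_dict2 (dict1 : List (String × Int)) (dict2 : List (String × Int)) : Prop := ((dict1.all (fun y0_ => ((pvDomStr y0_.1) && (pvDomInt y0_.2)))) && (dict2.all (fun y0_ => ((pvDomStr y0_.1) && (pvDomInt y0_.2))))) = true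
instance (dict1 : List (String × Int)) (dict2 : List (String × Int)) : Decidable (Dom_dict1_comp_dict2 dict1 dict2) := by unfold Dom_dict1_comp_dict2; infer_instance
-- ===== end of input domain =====

-- B replaces A's two directional early-return scans by a single pass over the union of the
-- key sets maintaining two flags (objective: alternative decomposition, same cost).

-- ===== PORT A =====
-- first loop of A: 'for k, v in dict2.items(): if k not in dict1 or v > dict1[k]: return -1'
def dictA_loop2 : List (String × Int) → PySem.Dict String Int → Option Int
  | [], _ => none
  | (k, v) :: rest, d1 =>
    match d1.get? k with
    | none => some (-1)
    | some w => if w < v then some (-1) else dictA_loop2 rest d1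

-- second loop of A: 'for k, v in dict1.items(): if k not in dict2 or v > dict2[k]: return 1'
def dictA_loop1 : List (String × Int) → PySem.Dict String Int → Option Int
  | [], _ => none
  | (k, v) :: rest, d2 =>
    match d2.get? k with
    | none => some 1
    | some w => if w < v then some 1 else dictA_loop1 rest d2

def dict1_comp_dict2 (dict1 : List (String × Int)) (dict2 : List (String × Int)) : Int :=
  let d1 := PySem.Dict.ofList dict1
  let d2 := PySem.Dict.ofList dict2
  match dictA_loop2 d2.items d1 with
  | some r => r
  | none =>
    match dictA_loop1 d1.items d2 with
    | some r => r
    | none => 0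

-- ===== PORT B =====
-- loop body of B: update the two flags for one key of the union
def altStep (d1 d2 : PySem.Dict String Int) (acc : Bool × Bool) (k : String) : Bool × Bool :=
  let v1 := d1.get? k
  let v2 := d2.get? k
  let e2 : Bool :=
    match v2, v1 with
    | some b, some a => decide (a < b)
    | some _, none => true
    | none, _ => false
  let e1 : Bool :=
    match v1, v2 with
    | some a, some b => decide (b < a)
    | some _, none => true
    | none, _ => false
  (acc.1 || e2, acc.2 || e1)

def dict1_comp_dict2_alt (dict1 : List (String × Int)) (dict2 : List (String × Int)) : Int :=
  let d1 := PySem.Dict.ofList dict1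
  let d2 := PySem.Dict.ofList dict2
  let ks := PySem.Set.union (PySem.Set.ofList d1.keys) (PySem.Set.ofList d2.keys)
  let r := ks.foldl (altStep d1 d2) (false, false)
  if r.1 then -1 else if r.2 then 1 else 0

-- ===== PRECONDITION & SPEC =====
def Spec_dict1_comp_dict2 (dict1 : List (String × Int)) (dict2 : List (String × Int)) (out : Int) : Prop := out = dict1_comp_dict2_alt dict1 dict2
instance (dict1 : List (String × Int)) (dict2 : List (String × Int)) (out : Int) : Decidable (Spec_dict1_comp_dict2 dict1 dict2 out) := by unfold Spec_dict1_comp_dict2; infer_instance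

-- ===== CLAIM (what is proved, stated in full; the proofs are below) =====
def Claim_equal_dict1_comp_dict2 : Prop := ∀ (dict1 : List (String × Int)) (dict2 : List (String × Int)), Dom_dict1_comp_dict2 dict1 dict2 → Spec_dict1_comp_dict2 dict1 dict2 (dict1_comp_dict2 dict1 dict2)

-- ===== LEMMAS AND PROOFS =====

-- the per-key condition B tests in the dict2 direction
def f2 (d1 d2 : PySem.Dict String Int) (k : String) : Bool :=
  match d2.get? k, d1.get? k with
  | some b, some a => decide (a < b)
  | some _, none => true
  | none, _ => false

def f1 (d1 d2 : PySem.Dict String Int) (k : String) : Bool :=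
  match d1.get? k, d2.get? k with
  | some a, some b => decide (b < a)
  | some _, none => true
  | none, _ => false

theorem dictA_loop2_eq (items : List (String × Int)) (d1 : PySem.Dict String Int) :
    dictA_loop2 items d1 =
      if items.any (fun p => match d1.get? p.1 with | none => true | some w => decide (w < p.2))
      then some (-1) else none := by
  induction items with
  | nil => simp [dictA_loop2]
  | cons p rest ih =>
    obtain ⟨k, v⟩ := p
    rcases h : d1.get? k with _ | w
    · simp [dictA_loop2, List.any_cons, h]
    · by_cases hv : w < v
      · simp [dictA_loop2, List.any_cons, h, hv]
      · have hm : dictA_loop2 ((k, v) :: rest) d1 = dictA_loop2 rest d1 := by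
          simp [dictA_loop2, h, hv]
        rw [hm, ih, List.any_cons, h]
        have hd : decide (w < v) = false := by simp [hv]
        simp only [hd, Bool.false_or]

theorem dictA_loop1_eq (items : List (String × Int)) (d2 : PySem.Dict String Int) :
    dictA_loop1 items d2 =
      if items.any (fun p => match d2.get? p.1 with | none => true | some w => decide (w < p.2))
      then some 1 else none := by
  induction items with
  | nil => simp [dictA_loop1]
  | cons p rest ih =>
    obtain ⟨k, v⟩ := p
    rcases h : d2.get? k with _ | w
    · simp [dictA_loop1, List.any_cons, h]
    · by_cases hv : w < v
      · simp [dictA_loop1, List.any_cons, h, hv]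
      · have hm : dictA_loop1 ((k, v) :: rest) d2 = dictA_loop1 rest d2 := by
          simp [dictA_loop1, h, hv]
        rw [hm, ih, List.any_cons, h]
        have hd : decide (w < v) = false := by simp [hv]
        simp only [hd, Bool.false_or]

theorem foldl_altStep (d1 d2 : PySem.Dict String Int) (ks : List String) (a b : Bool) :
    ks.foldl (altStep d1 d2) (a, b) = (a || ks.any (f2 d1 d2), b || ks.any (f1 d1 d2)) := by
  induction ks generalizing a b with
  | nil => simp
  | cons k rest ih =>
    simp only [List.foldl_cons, List.any_cons, altStep, ih, Prod.mk.injEq]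
    constructor <;> · simp only [f2, f1]; rcases d1.get? k with _ | a <;> rcases d2.get? k with _ | b <;>
      simp [Bool.or_assoc]

-- the union-pass condition agrees with A's scan of one dict's items
theorem any_items_eq_any_union (d1 d2 : PySem.Dict String Int)
    (h2 : d2.keys.Nodup) :
    (d2.items.any (fun p => match d1.get? p.1 with | none => true | some w => decide (w < p.2)))
      = ((PySem.Set.union (PySem.Set.ofList d1.keys) (PySem.Set.ofList d2.keys)).any (f2 d1 d2)) := by
  rw [Bool.eq_iff_iff]
  simp only [List.any_eq_true]
  constructor
  · rintro ⟨⟨k, v⟩, hmem, hc⟩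
    have hg : d2.get? k = some v := PySem.Dict.get?_of_mem_items _ hmem h2
    have hk : k ∈ d2.keys := by simpa using PySem.Dict.mem_keys_of_mem_items _ hmem
    refine ⟨k, by simp [PySem.Set.mem_union, PySem.Set.mem_ofList, hk], ?_⟩
    rcases hA : d1.get? k with _ | a
    · simp [f2, hg, hA]
    · simp only [f2, hg, hA]
      simpa [hA] using hc
  · rintro ⟨k, _, hc⟩
    rcases hg2 : d2.get? k with _ | v
    · simp [f2, hg2] at hc
    · refine ⟨(k, v), PySem.Dict.mem_items_of_get?_eq_some _ hg2, ?_⟩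
      rcases hA : d1.get? k with _ | a
      · simp
      · simpa [f2, hg2, hA] using hc

theorem any_items_eq_any_union' (d1 d2 : PySem.Dict String Int)
    (h1 : d1.keys.Nodup) :
    (d1.items.any (fun p => match d2.get? p.1 with | none => true | some w => decide (w < p.2)))
      = ((PySem.Set.union (PySem.Set.ofList d1.keys) (PySem.Set.ofList d2.keys)).any (f1 d1 d2)) := by
  rw [Bool.eq_iff_iff]
  simp only [List.any_eq_true]
  constructor
  · rintro ⟨⟨k, v⟩, hmem, hc⟩
    have hg : d1.get? k = some v := PySem.Dict.get?_of_mem_items _ hmem h1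
    have hk : k ∈ d1.keys := by simpa using PySem.Dict.mem_keys_of_mem_items _ hmem
    refine ⟨k, by simp [PySem.Set.mem_union, PySem.Set.mem_ofList, hk], ?_⟩
    rcases hA : d2.get? k with _ | a
    · simp [f1, hg, hA]
    · simp only [f1, hg, hA]
      simpa [hA] using hc
  · rintro ⟨k, _, hc⟩
    rcases hg1 : d1.get? k with _ | v
    · simp [f1, hg1] at hc
    · refine ⟨(k, v), PySem.Dict.mem_items_of_get?_eq_some _ hg1, ?_⟩
      rcases hA : d2.get? k with _ | a
      · simp
      · simpa [f1, hg1, hA] using hc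

-- ===== VERDICT (by name: the statement is the Claim_ definition above) =====
theorem dict1_comp_dict2_spec : Claim_equal_dict1_comp_dict2 := by
  intro dict1 dict2 _
  unfold Spec_dict1_comp_dict2
  dsimp only [dict1_comp_dict2, dict1_comp_dict2_alt]
  set d1 := PySem.Dict.ofList dict1 with hd1
  set d2 := PySem.Dict.ofList dict2 with hd2
  have h1 : d1.keys.Nodup := PySem.Dict.nodup_keys_ofList dict1
  have h2 : d2.keys.Nodup := PySem.Dict.nodup_keys_ofList dict2
  rw [dictA_loop2_eq, dictA_loop1_eq, foldl_altStep,
      any_items_eq_any_union d1 d2 h2, any_items_eq_any_union' d1 d2 h1]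
  cases ((PySem.Set.union (PySem.Set.ofList d1.keys) (PySem.Set.ofList d2.keys)).any (f2 d1 d2)) <;>
  cases ((PySem.Set.union (PySem.Set.ofList d1.keys) (PySem.Set.ofList d2.keys)).any (f1 d1 d2)) <;>
  simp
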